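-- pv_equiv track=rewrite | github.com/Dinu-Filip/A-Level-Stats-Tools | Distributions/distribution_templates.py | replace_vals
-- ===== SOURCE A (Python) =====
-- def replace_vals(params: dict, method: str) -> str:
--     del_1 = 0
--     del_2 = 1
--     while del_2 < len(method):
--         if method[del_1] == "#":
--             if method[del_2] == "#":
--                 key = method[del_1 + 1: del_2]
--                 method = method[:del_1] + params[key] + method[del_2 + 1:]
--                 del_1 += len(params[key])
--                 del_2 = del_1 + 1
--             else:
--                 del_2 += 1
--         else:
--             del_1 += 1
--             del_2 = del_1 + 1
--     return method
-- ===== SOURCE B (Python) =====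
-- def replace_vals(params: dict, method: str) -> str:
--     # Split once on '#': even-indexed parts are literal text, odd-indexed parts are
--     # keys -- except a final odd part, which means a trailing unmatched '#'.
--     parts = method.split('#')
--     out = [parts[0]]
--     i = 1
--     while i < len(parts) - 1:
--         out.append(params[parts[i]])
--         out.append(parts[i + 1])
--         i += 2
--     if i == len(parts) - 1:
--         out.append('#' + parts[i])
--     return ''.join(out)
-- ===== Notes on version B (the rewrite author's own statement) =====
-- stated objective: faster
-- what changed: A repeatedly rebuilds the whole string in place with a two-pointer scan (re-slicing and concatenating the entire string at every marker pair); B splits the string once on '#' and makes a single pass over the parts, pairing each odd-indexed key with the following literal and joining once at the end.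
import Mathlib
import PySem

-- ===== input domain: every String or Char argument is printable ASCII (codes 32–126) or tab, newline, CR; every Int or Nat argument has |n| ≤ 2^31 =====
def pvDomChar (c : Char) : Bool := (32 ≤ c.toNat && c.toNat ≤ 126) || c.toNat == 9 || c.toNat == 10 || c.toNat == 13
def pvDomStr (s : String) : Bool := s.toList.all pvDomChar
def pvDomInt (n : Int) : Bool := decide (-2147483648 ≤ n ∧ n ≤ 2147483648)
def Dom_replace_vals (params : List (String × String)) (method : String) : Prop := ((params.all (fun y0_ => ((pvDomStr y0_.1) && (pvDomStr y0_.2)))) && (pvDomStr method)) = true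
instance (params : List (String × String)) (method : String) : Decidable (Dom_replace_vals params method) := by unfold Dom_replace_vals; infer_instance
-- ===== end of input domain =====

-- B replaces A's in-place two-pointer rebuilding of the string by a single split on '#'
-- followed by one left-to-right pass pairing key/literal parts (objective: faster; measured).

-- ===== PORT A =====
-- A's while loop over (method, del_1, del_2); the invariant del_1 < del_2 (true from the
-- initial call (0,1) and preserved by every step) is carried as a hypothesis only for
-- termination.  Slices method[a:b] with 0 ≤ a ≤ b are (drop a).take (b-a), exact here.
-- params[key] is first-match lookup; missing keys (KeyError in Python) are excluded by
-- Pre_replace_vals, the port returns "" there.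
def loopA (params : List (String × String)) (m : List Char) (d1 d2 : Nat)
    (h : d1 < d2) : List Char :=
  if hl : d2 < m.length then
    if m[d1]? = some '#' then
      if m[d2]? = some '#' then
        let v := ((params.lookup (String.mk ((m.drop (d1 + 1)).take (d2 - (d1 + 1))))).getD "").toList
        loopA params (m.take d1 ++ v ++ m.drop (d2 + 1)) (d1 + v.length) (d1 + v.length + 1)
          (by omega)
      else
        loopA params m d1 (d2 + 1) (by omega)
    else
      loopA params m (d1 + 1) (d1 + 2) (by omega)
  else m
termination_by (m.length - d1, m.length - d2)
decreasing_by
  · apply Prod.Lex.left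
    have : (m.take d1).length = d1 := by
      simp [List.length_take]; omega
    simp [List.length_append, this, List.length_drop]
    omega
  · apply Prod.Lex.right'
    · omega
    · omega
  · apply Prod.Lex.left; omega

def replace_vals (params : List (String × String)) (method : String) : String :=
  String.mk (loopA params method.toList 0 1 (by omega))

-- ===== PORT B =====
-- Source B: parts = method.split('#'); while i < len(parts)-1 append params[parts[i]] and
-- parts[i+1], stepping i by 2; a final lone odd part is a trailing unmatched '#'.
-- ''.join(out) is List.flatten; parts[i] (always in range under the guard) is getD.
def loopB (params : List (String × String)) (parts : List (List Char)) (i : Nat)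
    (out : List (List Char)) : List (List Char) :=
  if i < parts.length - 1 then
    loopB params parts (i + 2)
      (out ++ [((params.lookup (String.mk (parts.getD i []))).getD "").toList,
               parts.getD (i + 1) []])
  else if i = parts.length - 1 then out ++ ['#' :: parts.getD i []]
  else out
termination_by parts.length - i

def replace_vals_alt (params : List (String × String)) (method : String) : String :=
  String.mk (List.flatten (loopB params (method.toList.splitOn '#') 1
    [(method.toList.splitOn '#').headD []]))

-- ===== PRECONDITION & SPEC =====
-- Pre_ excludes exactly the inputs where Python A raises KeyError: some key enclosed in
-- a matched pair of '#' markers (an odd-indexed, non-final part of method.split('#'))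
-- is missing from params.  My Python B raises KeyError on the same inputs.
def Pre_replace_vals (params : List (String × String)) (method : String) : Prop :=
  ∀ i ∈ List.range ((method.toList.splitOn '#').length - 1),
    i % 2 = 1 →
      (params.lookup (String.mk ((method.toList.splitOn '#').getD i []))).isSome = true
instance (params : List (String × String)) (method : String) :
    Decidable (Pre_replace_vals params method) := by unfold Pre_replace_vals; infer_instance

def pvWitness_replace_vals : (List (String × String)) × String := ([("x", "1")], "#x#")

def Spec_replace_vals (params : List (String × String)) (method : String) (out : String) : Prop := out = replace_vals_alt params method
instance (params : List (String × String)) (method : String) (out : String) : Decidable (Spec_replace_vals params method out) := by unfold Spec_replace_vals; infer_instance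

-- ===== CLAIM (what is proved, stated in full; the proofs are below) =====
def Claim_equal_replace_vals : Prop := ∀ (params : List (String × String)) (method : String), Dom_replace_vals params method → Pre_replace_vals params method → Spec_replace_vals params method (replace_vals params method)

-- ===== LEMMAS AND PROOFS =====

-- the value substituted for a key (B's params[parts[i]], total form)
def valOf (params : List (String × String)) (k : List Char) : List Char :=
  ((params.lookup (String.mk k)).getD "").toList

-- what B emits for the parts after the first: key/literal pairs, a lone last part is a
-- trailing unmatched '#'
def emit (params : List (String × String)) : List (List Char) → List Char
  | [] => []
  | [k] => '#' :: k
  | k :: l :: ts => valOf params k ++ l ++ emit params ts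

-- B's whole result on a string
def ebody (params : List (String × String)) (t : List Char) : List Char :=
  (t.splitOn '#').headD [] ++ emit params ((t.splitOn '#').drop 1)

theorem loopB_emit (params : List (String × String)) (n : Nat) :
    ∀ (parts : List (List Char)) (i : Nat) (out : List (List Char)),
      parts.length - i ≤ n → 1 ≤ i →
      (loopB params parts i out).flatten = out.flatten ++ emit params (parts.drop i) := by
  induction n with
  | zero =>
    intro parts i out hn hi
    rw [loopB]
    have hge : parts.length ≤ i := by omega
    rw [List.drop_eq_nil_of_le hge]
    have h1 : ¬ i < parts.length - 1 := by omega
    have h2 : ¬ i = parts.length - 1 := by omega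
    simp [h1, h2, emit]
  | succ n ih =>
    intro parts i out hn hi
    rw [loopB]
    by_cases h1 : i < parts.length - 1
    · simp only [h1, if_true]
      rw [ih parts (i + 2) _ (by omega) (by omega)]
      have hlt : i < parts.length := by omega
      have hlt2 : i + 1 < parts.length := by omega
      have hdrop : parts.drop i = parts[i] :: parts[i+1] :: parts.drop (i + 2) := by
        rw [List.drop_eq_getElem_cons hlt, List.drop_eq_getElem_cons hlt2]
      rw [hdrop, emit]
      simp [List.getD_eq_getElem?_getD, hlt, hlt2, valOf]
    · simp only [h1, if_false]
      by_cases h2 : i = parts.length - 1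
      · have hlen : 1 ≤ parts.length := by omega
        have hlt : i < parts.length := by omega
        have hdrop : parts.drop i = [parts[i]] := by
          rw [List.drop_eq_getElem_cons hlt]
          have : parts.drop (i + 1) = [] := List.drop_eq_nil_of_le (by omega)
          rw [this]
        simp [h2, List.getD_eq_getElem?_getD]
        simp [← h2, hdrop, emit, hlt]
      · have hge : parts.length ≤ i := by omega
        rw [List.drop_eq_nil_of_le hge]
        simp [h2, emit]

-- index / slice arithmetic on the A-side state (done ++ rest, |done|, |done|+1+|mid|)
theorem getElem?_done (done rest : List Char) (c : Char) :
    (done ++ c :: rest)[done.length]? = some c := by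
  simp

theorem getElem?_mid (done mid rest : List Char) (c : Char) :
    (done ++ '#' :: mid ++ c :: rest)[done.length + 1 + mid.length]? = some c := by
  have : done ++ '#' :: mid ++ c :: rest = (done ++ '#' :: mid) ++ c :: rest := by
    simp
  rw [this]
  have hl : (done ++ '#' :: mid).length = done.length + 1 + mid.length := by
    simp; omega
  rw [← hl]
  simp

theorem slice_mid (done mid rest : List Char) :
    (((done ++ '#' :: mid ++ rest).drop (done.length + 1)).take
      (done.length + 1 + mid.length - (done.length + 1))) = mid := by
  have h1 : (done ++ '#' :: mid ++ rest).drop (done.length + 1)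
      = mid ++ rest := by
    have : done ++ '#' :: mid ++ rest = (done ++ ['#']) ++ (mid ++ rest) := by simp
    rw [this]
    have hl : (done ++ ['#']).length = done.length + 1 := by simp
    rw [← hl, List.drop_left]
  rw [h1]
  have : done.length + 1 + mid.length - (done.length + 1) = mid.length := by omega
  rw [this, List.take_left]

theorem take_done (done rest : List Char) :
    (done ++ rest).take done.length = done := by simp

theorem take_done2 (done mid rest : List Char) :
    ((done ++ '#' :: mid) ++ rest).take done.length = done := by
  rw [List.append_assoc]
  exact take_done done _

theorem drop_after (done mid rest : List Char) (c : Char) :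
    (done ++ '#' :: mid ++ c :: rest).drop (done.length + 1 + mid.length + 1) = rest := by
  have h : done.length + 1 + mid.length + 1 = done.length + (mid.length + 2) := by omega
  rw [h, List.drop_append]
  have h2 : mid.length + 2 = (mid.length + 1) + 1 := by omega
  rw [h2]
  simp [List.drop_succ_cons]
  have h3 : done.length + (mid.length + 1 + 1) - (done.length + (mid.length + 1)) = 1 := by
    omega
  rw [h3]
  simp

-- splitOn structure
theorem splitOn_hash_cons (rest : List Char) :
    ('#' :: rest).splitOn '#' = [] :: rest.splitOn '#' := by
  simp [List.splitOn, List.splitOnP_cons]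

theorem splitOn_cons_ne (c : Char) (hc : c ≠ '#') (rest : List Char) :
    (c :: rest).splitOn '#' = (rest.splitOn '#').modifyHead (c :: ·) := by
  simp [List.splitOn, List.splitOnP_cons, hc]

theorem ebody_cons_ne (params : List (String × String)) (c : Char) (hc : c ≠ '#')
    (rest : List Char) : ebody params (c :: rest) = c :: ebody params rest := by
  unfold ebody
  rw [splitOn_cons_ne c hc]
  obtain ⟨r0, rs, hsplit⟩ : ∃ r0 rs, rest.splitOn '#' = r0 :: rs := by
    cases h : rest.splitOn '#' with
    | nil => exact absurd h (List.splitOnP_ne_nil _ rest)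
    | cons a b => exact ⟨a, b, rfl⟩
  rw [hsplit]
  simp [List.modifyHead]

theorem splitOn_nil : (([] : List Char)).splitOn '#' = [[]] := by
  simp [List.splitOn, List.splitOnP_nil]

theorem splitOn_ne_nil (t : List Char) : t.splitOn '#' ≠ [] :=
  List.splitOnP_ne_nil _ t

theorem splitOn_no_hash_append (mid rest : List Char) (hmid : '#' ∉ mid) :
    (mid ++ rest).splitOn '#'
      = (mid ++ (rest.splitOn '#').headD []) :: (rest.splitOn '#').drop 1 := by
  induction mid with
  | nil =>
    obtain ⟨r0, rs, hsplit⟩ : ∃ r0 rs, rest.splitOn '#' = r0 :: rs := by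
      cases h : rest.splitOn '#' with
      | nil => exact absurd h (splitOn_ne_nil rest)
      | cons a b => exact ⟨a, b, rfl⟩
    simp [hsplit]
  | cons c mid' ih =>
    have hc : c ≠ '#' := fun h => hmid (h ▸ List.mem_cons_self)
    have hmid' : '#' ∉ mid' := fun h => hmid (List.mem_cons_of_mem _ h)
    rw [List.cons_append, splitOn_cons_ne c hc, ih hmid']
    simp [List.modifyHead]

-- ebody of a string starting a marker: '#'::mid++rest with mid '#'-free
theorem ebody_hash (params : List (String × String)) (mid rest : List Char)
    (hmid : '#' ∉ mid) :
    ebody params ('#' :: (mid ++ rest)) =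
      emit params ((mid ++ (rest.splitOn '#').headD []) :: (rest.splitOn '#').drop 1) := by
  unfold ebody
  rw [splitOn_hash_cons, splitOn_no_hash_append mid rest hmid]
  simp

-- emit on a key prepended to a full split is the key's value followed by B's result
theorem emit_cons_split (params : List (String × String)) (k rest : List Char) :
    emit params (k :: rest.splitOn '#') = valOf params k ++ ebody params rest := by
  obtain ⟨r0, rs, hsplit⟩ : ∃ r0 rs, rest.splitOn '#' = r0 :: rs := by
    cases h : rest.splitOn '#' with
    | nil => exact absurd h (splitOn_ne_nil rest)
    | cons a b => exact ⟨a, b, rfl⟩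
  rw [hsplit, emit]
  unfold ebody
  rw [hsplit]
  simp

-- proof-irrelevant congruence for loopA (used to adjust list/index shapes)
theorem loopA_congr (params : List (String × String)) {m m' : List Char} {d1 d2 d1' d2' : Nat}
    (hm : m = m') (h1 : d1 = d1') (h2 : d2 = d2') (h : d1 < d2) (h' : d1' < d2') :
    loopA params m d1 d2 h = loopA params m' d1' d2' h' := by
  subst hm; subst h1; subst h2; rfl

-- the joint induction: A's scan equals B's split-based pass.
-- Main (first conjunct): state (done ++ rest, |done|, |done|+1), done fully processed.
-- Aux (second): scanning a marker, state (done ++ '#'::mid++rest, |done|, |done|+1+|mid|).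
theorem loopA_ebody (params : List (String × String)) (n : Nat) :
    (∀ (done rest : List Char), rest.length ≤ n →
      loopA params (done ++ rest) done.length (done.length + 1) (by omega)
        = done ++ ebody params rest)
    ∧ (∀ (done mid rest : List Char), rest.length ≤ n → '#' ∉ mid →
      loopA params (done ++ '#' :: mid ++ rest) done.length (done.length + 1 + mid.length)
        (by omega) = done ++ ebody params ('#' :: (mid ++ rest))) := by
  induction n with
  | zero =>
    constructor
    · intro done rest hn
      have : rest = [] := List.eq_nil_of_length_eq_zero (by omega)
      subst this
      rw [loopA]
      have hl : ¬ done.length + 1 < (done ++ ([] : List Char)).length := by simp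
      rw [dif_neg hl]
      simp [ebody, emit]
    · intro done mid rest hn hmid
      have : rest = [] := List.eq_nil_of_length_eq_zero (by omega)
      subst this
      rw [loopA]
      have hl : ¬ done.length + 1 + mid.length < (done ++ '#' :: mid ++ ([] : List Char)).length := by
        simp; omega
      rw [dif_neg hl]
      rw [ebody_hash params mid [] hmid]
      simp [emit]
  | succ n ih =>
    constructor
    · intro done rest hn
      match rest with
      | [] =>
        rw [loopA]
        have hl : ¬ done.length + 1 < (done ++ ([] : List Char)).length := by simp
        rw [dif_neg hl]
        simp [ebody, emit]
      | [c] =>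
        rw [loopA]
        have hl : ¬ done.length + 1 < (done ++ [c]).length := by simp
        rw [dif_neg hl]
        by_cases hc : c = '#'
        · subst hc
          rw [ebody, splitOn_hash_cons, splitOn_nil]
          simp [emit]
        · rw [ebody, splitOn_cons_ne c hc, splitOn_nil]
          simp [List.modifyHead, emit]
      | c :: d :: rest'' =>
        by_cases hc : c = '#'
        · subst hc
          have := ih.2 done [] (d :: rest'') (by simp at hn ⊢; omega) (by simp)
          simpa using this
        · rw [loopA]
          have hl : done.length + 1 < (done ++ c :: d :: rest'').length := by simp
          rw [dif_pos hl]
          have hd1 : (done ++ c :: d :: rest'')[done.length]? = some c := getElem?_done done _ c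
          rw [if_neg (by rw [hd1]; simp [hc])]
          have heq : loopA params (done ++ c :: d :: rest'') (done.length + 1)
              (done.length + 1 + 1) (by omega)
              = loopA params ((done ++ [c]) ++ d :: rest'') (done ++ [c]).length
                ((done ++ [c]).length + 1) (by omega) := by
            apply loopA_congr <;> simp
          rw [heq, ih.1 (done ++ [c]) (d :: rest'') (by simp at hn ⊢; omega)]
          rw [ebody_cons_ne params c hc]
          simp
    · intro done mid rest hn hmid
      match rest with
      | [] =>
        rw [loopA]
        have hl : ¬ done.length + 1 + mid.length < (done ++ '#' :: mid ++ ([] : List Char)).length := by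
          simp; omega
        rw [dif_neg hl]
        rw [ebody_hash params mid [] hmid]
        simp [emit]
      | c :: rest' =>
        rw [loopA]
        have hl : done.length + 1 + mid.length < (done ++ '#' :: mid ++ c :: rest').length := by
          simp; omega
        rw [dif_pos hl]
        have hd1 : (done ++ '#' :: mid ++ c :: rest')[done.length]? = some '#' := by
          simp
        rw [if_pos (by rw [hd1])]
        have hd2 : (done ++ '#' :: mid ++ c :: rest')[done.length + 1 + mid.length]? = some c :=
          getElem?_mid done mid rest' c
        by_cases hc : c = '#'
        · subst hc
          rw [if_pos (by rw [hd2])]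
          have heq : (loopA params ((done ++ '#' :: mid ++ '#' :: rest').take done.length
                ++ ((params.lookup (String.mk (((done ++ '#' :: mid ++ '#' :: rest').drop
                      (done.length + 1)).take
                      (done.length + 1 + mid.length - (done.length + 1))))).getD "").toList
                ++ (done ++ '#' :: mid ++ '#' :: rest').drop (done.length + 1 + mid.length + 1))
              (done.length + ((params.lookup (String.mk (((done ++ '#' :: mid ++ '#' :: rest').drop
                      (done.length + 1)).take
                      (done.length + 1 + mid.length - (done.length + 1))))).getD "").toList.length)
              (done.length + ((params.lookup (String.mk (((done ++ '#' :: mid ++ '#' :: rest').drop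
                      (done.length + 1)).take
                      (done.length + 1 + mid.length - (done.length + 1))))).getD "").toList.length + 1)
              (by omega))
              = loopA params ((done ++ valOf params mid) ++ rest') (done ++ valOf params mid).length
                ((done ++ valOf params mid).length + 1) (by omega) := by
            apply loopA_congr params
            · rw [slice_mid done mid ('#' :: rest'),
                take_done2 done mid ('#' :: rest'), drop_after done mid rest' '#']
              simp [valOf]
            · rw [slice_mid done mid ('#' :: rest')]
              simp [valOf]
            · rw [slice_mid done mid ('#' :: rest')]
              simp [valOf]
          rw [heq, ih.1 (done ++ valOf params mid) rest' (by simp at hn ⊢; omega)]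
          rw [ebody_hash params mid ('#' :: rest') hmid, splitOn_hash_cons]
          simp only [List.headD_cons, List.drop_succ_cons, List.drop_zero, List.append_nil]
          rw [emit_cons_split]
          simp
        · rw [if_neg (by rw [hd2]; simp [hc])]
          have heq : loopA params (done ++ '#' :: mid ++ c :: rest') done.length
              (done.length + 1 + mid.length + 1) (by omega)
              = loopA params (done ++ '#' :: (mid ++ [c]) ++ rest') done.length
                (done.length + 1 + (mid ++ [c]).length) (by omega) := by
            apply loopA_congr
            · simp
            · rfl
            · simp
              omega
          have hmid' : '#' ∉ mid ++ [c] := by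
            simp [hmid]
            exact fun h => hc h.symm
          rw [heq, ih.2 done (mid ++ [c]) rest' (by simp at hn ⊢; omega) hmid']
          have : (mid ++ [c]) ++ rest' = mid ++ c :: rest' := by simp
          rw [this]

-- ===== VERDICT (by name: the statement is the Claim_ definition above) =====
theorem replace_vals_spec : Claim_equal_replace_vals := by
  intro params method _ _
  unfold Spec_replace_vals replace_vals replace_vals_alt
  congr 1
  have hA := (loopA_ebody params method.toList.length).1 [] method.toList (le_refl _)
  have hA' : loopA params method.toList 0 1 (by omega) = ebody params method.toList := by
    have hc := loopA_congr params (m := method.toList) (m' := [] ++ method.toList)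
      (d1 := 0) (d2 := 1) (d1' := ([] : List Char).length)
      (d2' := ([] : List Char).length + 1) (by simp) (by simp) (by simp) (by omega) (by omega)
    rw [hc, hA]
    simp [ebody]
  rw [hA']
  rw [loopB_emit params ((method.toList.splitOn '#').length)
    (method.toList.splitOn '#') 1 [(method.toList.splitOn '#').headD []]
    (by omega) (le_refl 1)]
  unfold ebody
  simp
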